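-- pv_equiv track=rewrite | github.com/brokentelescope/CCC-Solutions | 11/CCC '11 S3 - Alice Through the Looking Glass.py | solve
-- ===== SOURCE A (Python) =====
-- def solve(m, x, y):
--     size = 5 ** (m-1)
--     curx, cury = x//size, y//size
--
--     # 0 0 0 0 0
--     # 0 0 0 0 0
--     # 0 0 y 0 0
--     # 0 y x y 0
--     # 0 x x x 0
--
--     # if it is in the spots marked by x, it is guaranteed crystal
--
--     if (cury == 0 and curx in [1, 2, 3]) or (curx == 2 and cury == 1):
--         return "crystal"
--
--     # if it is in the spots marked by 0, it is guaranteed to be empty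
--
--     if curx in [0, 4] or cury in [3, 4] or (curx == 1 and cury == 2) or (curx == 3 and cury == 2):
--         return "empty"
--
--     # if it is in the spots marked by y, we aren't sure
--
--     if (curx in [1, 3] and cury == 1) or (curx == 2 and cury == 2):
--         # if its magnification level 1, we know that they are empty
--         if m == 1:
--             return "empty"
--         # otherwise go to the prior level
--         return solve(m-1, x % size, y % size)
-- ===== SOURCE B (Python) =====
-- CRYSTAL = {(1, 0), (2, 0), (3, 0), (2, 1)}
-- UNCERTAIN = {(1, 1), (3, 1), (2, 2)}
--
-- def solve(m, x, y):
--     size = 5 ** (m - 1)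
--     while True:
--         cell = (x // size, y // size)
--         if cell in CRYSTAL:
--             return "crystal"
--         if cell not in UNCERTAIN:
--             return "empty"
--         if size == 1:
--             return "empty"
--         x, y, size = x % size, y % size, size // 5
-- ===== Notes on version B (the rewrite author's own statement) =====
-- stated objective: alternative
-- what changed: A's self-recursion over magnification levels is replaced by an explicit while loop that threads (x, y, size) through the levels, classifying each cell against literal crystal/uncertain coordinate sets instead of chained comparison conditions; Pre_ excludes m <= 0 (Python computes a float power there) and the inputs whose top-level cell lies outside the classified 5x5 pattern, where A falls through and returns None instead of a string.
-- outside the precondition, e.g. on solve(0, 0, 0): A returns 'empty', B returns 'empty'; on solve(1, 7, 0): A returns None, B returns 'empty'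
import Mathlib
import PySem

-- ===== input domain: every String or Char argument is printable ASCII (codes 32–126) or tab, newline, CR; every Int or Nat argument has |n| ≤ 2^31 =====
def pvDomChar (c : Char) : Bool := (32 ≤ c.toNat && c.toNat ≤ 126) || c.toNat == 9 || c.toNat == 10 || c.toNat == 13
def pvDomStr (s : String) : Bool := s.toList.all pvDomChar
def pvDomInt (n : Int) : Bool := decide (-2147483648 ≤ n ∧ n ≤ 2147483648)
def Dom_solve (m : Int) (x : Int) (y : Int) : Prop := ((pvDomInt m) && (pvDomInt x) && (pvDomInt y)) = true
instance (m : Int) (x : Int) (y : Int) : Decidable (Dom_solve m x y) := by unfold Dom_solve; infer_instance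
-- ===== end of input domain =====

-- B replaces A's self-recursion on the magnification level by an explicit loop over levels
-- threading (x, y, size); return values are proved equal on Pre_solve (alternative decomposition).


-- ===== PORT A =====
-- fuel makes the Int-valued recursion on m total; inside Pre_solve the recursion depth is at
-- most m, so fuel m.toNat is never exhausted.  The final "" stands for Python's implicit
-- 'return None' fall-through, which Pre_solve excludes.
def solveA : Nat → Int → Int → Int → String
  | 0, _, _, _ => ""
  | fuel+1, m, x, y =>
    let size : Int := 5 ^ (m - 1).toNat
    let curx := PySem.Int.floordiv x size
    let cury := PySem.Int.floordiv y size
    if (cury == 0 && (curx == 1 || curx == 2 || curx == 3)) || (curx == 2 && cury == 1) then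
      "crystal"
    else if (curx == 0 || curx == 4) || (cury == 3 || cury == 4) ||
            (curx == 1 && cury == 2) || (curx == 3 && cury == 2) then
      "empty"
    else if ((curx == 1 || curx == 3) && cury == 1) || (curx == 2 && cury == 2) then
      if m == 1 then "empty"
      else solveA fuel (m - 1) (PySem.Int.mod x size) (PySem.Int.mod y size)
    else ""

def solve (m : Int) (x : Int) (y : Int) : String := solveA m.toNat m x y

-- ===== PORT B =====
def crystalCells : PySem.Set (Int × Int) := PySem.Set.ofList [(1, 0), (2, 0), (3, 0), (2, 1)]
def uncertainCells : PySem.Set (Int × Int) := PySem.Set.ofList [(1, 1), (3, 1), (2, 2)]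

-- Source B's 'while True' loop over levels, threading (size, x, y); the fuel bounds the iteration
-- count (at most m levels inside Pre_solve), "" is the never-reached fuel-exhaustion value.
def solveLoop : Nat → Int → Int → Int → String
  | 0, _, _, _ => ""
  | fuel+1, size, x, y =>
    let cell := (PySem.Int.floordiv x size, PySem.Int.floordiv y size)
    if PySem.Set.contains crystalCells cell then "crystal"
    else if !(PySem.Set.contains uncertainCells cell) then "empty"
    else if size == 1 then "empty"
    else solveLoop fuel (PySem.Int.floordiv size 5) (PySem.Int.mod x size) (PySem.Int.mod y size)

def solve_alt (m : Int) (x : Int) (y : Int) : String :=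
  solveLoop m.toNat ((5 : Int) ^ (m - 1).toNat) x y

-- ===== PRECONDITION & SPEC =====
-- Pre_solve excludes m ≤ 0, on which Python's 5 ** (m-1) is a float so the whole computation
-- leaves int semantics, and the inputs whose top-level 5×5 cell lies outside the classified
-- pattern, on which A falls through every branch and returns None instead of a string; for
-- m ≥ 15 the top-level cell is classified exactly when 0 ≤ x on the domain |x|, |y| ≤ 2^31.
def Pre_solve (m : Int) (x : Int) (y : Int) : Prop :=
  1 ≤ m ∧
  (if m ≤ 14 then
    ((PySem.Int.floordiv y (5 ^ (m-1).toNat) = 0 ∧ (PySem.Int.floordiv x (5 ^ (m-1).toNat) = 1 ∨ PySem.Int.floordiv x (5 ^ (m-1).toNat) = 2 ∨ PySem.Int.floordiv x (5 ^ (m-1).toNat) = 3)) ∨ (PySem.Int.floordiv x (5 ^ (m-1).toNat) = 2 ∧ PySem.Int.floordiv y (5 ^ (m-1).toNat) = 1)) ∨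
    (PySem.Int.floordiv x (5 ^ (m-1).toNat) = 0 ∨ PySem.Int.floordiv x (5 ^ (m-1).toNat) = 4 ∨ PySem.Int.floordiv y (5 ^ (m-1).toNat) = 3 ∨ PySem.Int.floordiv y (5 ^ (m-1).toNat) = 4 ∨ (PySem.Int.floordiv x (5 ^ (m-1).toNat) = 1 ∧ PySem.Int.floordiv y (5 ^ (m-1).toNat) = 2) ∨ (PySem.Int.floordiv x (5 ^ (m-1).toNat) = 3 ∧ PySem.Int.floordiv y (5 ^ (m-1).toNat) = 2)) ∨
    (((PySem.Int.floordiv x (5 ^ (m-1).toNat) = 1 ∨ PySem.Int.floordiv x (5 ^ (m-1).toNat) = 3) ∧ PySem.Int.floordiv y (5 ^ (m-1).toNat) = 1) ∨ (PySem.Int.floordiv x (5 ^ (m-1).toNat) = 2 ∧ PySem.Int.floordiv y (5 ^ (m-1).toNat) = 2))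
   else 0 ≤ x)
instance (m : Int) (x : Int) (y : Int) : Decidable (Pre_solve m x y) := by
  unfold Pre_solve; infer_instance
def pvWitness_solve : Int × Int × Int := (2, 7, 3)
def Spec_solve (m : Int) (x : Int) (y : Int) (out : String) : Prop := out = solve_alt m x y
instance (m : Int) (x : Int) (y : Int) (out : String) : Decidable (Spec_solve m x y out) := by unfold Spec_solve; infer_instance

-- ===== CLAIM (what is proved, stated in full; the proofs are below) =====
def Claim_equal_solve : Prop := ∀ (m : Int) (x : Int) (y : Int), Dom_solve m x y → Pre_solve m x y → Spec_solve m x y (solve m x y)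

-- ===== LEMMAS AND PROOFS =====

-- A's three branch conditions as boolean predicates of the cell coordinates.
def condCrys (cx cy : Int) : Bool :=
  (cy == 0 && (cx == 1 || cx == 2 || cx == 3)) || (cx == 2 && cy == 1)
def condEmp (cx cy : Int) : Bool :=
  (cx == 0 || cx == 4) || (cy == 3 || cy == 4) || (cx == 1 && cy == 2) || (cx == 3 && cy == 2)
def condUnc (cx cy : Int) : Bool :=
  ((cx == 1 || cx == 3) && cy == 1) || (cx == 2 && cy == 2)

theorem contains_crys (cx cy : Int) :
    PySem.Set.contains crystalCells (cx, cy) = condCrys cx cy := by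
  apply Bool.eq_iff_iff.mpr
  simp [crystalCells, PySem.Set.contains, PySem.Set.ofList, condCrys, Prod.ext_iff]
  tauto

theorem contains_unc (cx cy : Int) :
    PySem.Set.contains uncertainCells (cx, cy) = condUnc cx cy := by
  apply Bool.eq_iff_iff.mpr
  simp [uncertainCells, PySem.Set.contains, PySem.Set.ofList, condUnc, Prod.ext_iff]
  tauto

theorem solveA_eq (fuel : Nat) (m x y : Int) :
    solveA (fuel+1) m x y =
      (if condCrys (PySem.Int.floordiv x (5 ^ (m-1).toNat)) (PySem.Int.floordiv y (5 ^ (m-1).toNat)) then "crystal"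
       else if condEmp (PySem.Int.floordiv x (5 ^ (m-1).toNat)) (PySem.Int.floordiv y (5 ^ (m-1).toNat)) then "empty"
       else if condUnc (PySem.Int.floordiv x (5 ^ (m-1).toNat)) (PySem.Int.floordiv y (5 ^ (m-1).toNat)) then
         if m == 1 then "empty"
         else solveA fuel (m - 1) (PySem.Int.mod x (5 ^ (m-1).toNat)) (PySem.Int.mod y (5 ^ (m-1).toNat))
       else "") := rfl

theorem solveLoop_eq (fuel : Nat) (s x y : Int) :
    solveLoop (fuel+1) s x y =
      (if condCrys (PySem.Int.floordiv x s) (PySem.Int.floordiv y s) then "crystal"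
       else if !(condUnc (PySem.Int.floordiv x s) (PySem.Int.floordiv y s)) then "empty"
       else if s == 1 then "empty"
       else solveLoop fuel (PySem.Int.floordiv s 5) (PySem.Int.mod x s) (PySem.Int.mod y s)) := by
  simp only [solveLoop, contains_crys, contains_unc]

-- the recursion and the loop agree level by level on in-range coordinates
theorem solveA_eq_loop (n : Nat) : ∀ (x y : Int), 0 ≤ x → x < 5^(n+1) → 0 ≤ y → y < 5^(n+1) →
    solveA (n+1) ((n+1 : Nat) : Int) x y = solveLoop (n+1) ((5:Int)^n) x y := by
  induction n with
  | zero =>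
    intro x y hx0 hx hy0 hy
    norm_num at hx hy
    interval_cases x <;> interval_cases y <;> decide
  | succ k ih =>
    intro x y hx0 hx hy0 hy
    have hs : (0:Int) < 5^(k+1) := by positivity
    have hediv : ∀ a : Int, PySem.Int.floordiv a ((5:Int)^(k+1)) = a / 5^(k+1) :=
      fun a => PySem.Int.floordiv_eq_ediv_of_pos hs
    have htn : ((((k+2:Nat)):Int) - 1).toNat = k+1 := by omega
    have hsub : (((k+2:Nat):Int)) - 1 = ((k+1:Nat):Int) := by push_cast; ring
    have hm1 : ((((k+2:Nat)):Int) == 1) = false := by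
      rw [beq_eq_false_iff_ne]; push_cast; omega
    have hsz1 : ((5^(k+1):Int) == 1) = false := by
      rw [beq_eq_false_iff_ne]
      have : (5:Int)^1 ≤ 5^(k+1) := pow_le_pow_right₀ (by norm_num) (by omega)
      norm_num at this; omega
    have hdiv5 : PySem.Int.floordiv ((5:Int)^(k+1)) 5 = 5^k := by
      rw [PySem.Int.floordiv_eq_ediv_of_pos (by norm_num), pow_succ]
      exact Int.mul_ediv_cancel _ (by norm_num)
    have hmodx : PySem.Int.mod x ((5:Int)^(k+1)) = x % 5^(k+1) :=
      PySem.Int.mod_eq_emod_of_pos hs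
    have hmody : PySem.Int.mod y ((5:Int)^(k+1)) = y % 5^(k+1) :=
      PySem.Int.mod_eq_emod_of_pos hs
    have hrec := ih (x % 5^(k+1)) (y % 5^(k+1)) (Int.emod_nonneg x (by positivity))
      (Int.emod_lt_of_pos x hs) (Int.emod_nonneg y (by positivity)) (Int.emod_lt_of_pos y hs)
    obtain ⟨cx, hcx, hcx0, hcx5⟩ : ∃ c, x / (5^(k+1):Int) = c ∧ 0 ≤ c ∧ c < 5 :=
      ⟨_, rfl, Int.ediv_nonneg hx0 hs.le,
        Int.ediv_lt_of_lt_mul hs (by rw [pow_succ] at hx; linarith)⟩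
    obtain ⟨cy, hcy, hcy0, hcy5⟩ : ∃ c, y / (5^(k+1):Int) = c ∧ 0 ≤ c ∧ c < 5 :=
      ⟨_, rfl, Int.ediv_nonneg hy0 hs.le,
        Int.ediv_lt_of_lt_mul hs (by rw [pow_succ] at hy; linarith)⟩
    rw [solveA_eq, solveLoop_eq, htn]
    rw [hediv x, hediv y, hcx, hcy, hsub, hm1, hsz1, hdiv5, hmodx, hmody]
    interval_cases cx <;> interval_cases cy <;>
      first
        | rfl
        | (simp only [condCrys, condEmp, condUnc]; norm_num; exact hrec)

theorem conds_of_empty (cx cy : Int)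
    (h : cx = 0 ∨ cx = 4 ∨ cy = 3 ∨ cy = 4 ∨ (cx = 1 ∧ cy = 2) ∨ (cx = 3 ∧ cy = 2)) :
    condCrys cx cy = false ∧ condUnc cx cy = false ∧ condEmp cx cy = true := by
  simp only [condCrys, condUnc, condEmp, Bool.or_eq_true, Bool.and_eq_true,
    Bool.or_eq_false_iff, Bool.and_eq_false_iff, beq_iff_eq, beq_eq_false_iff_ne]
  omega

theorem quot_bounds (s a : Int) (hs : 0 < s) (h0 : 0 ≤ a / s) (h4 : a / s ≤ 4) :
    0 ≤ a ∧ a < 5 * s := by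
  have hd := Int.mul_ediv_add_emod a s
  have hr0 := Int.emod_nonneg a (ne_of_gt hs)
  have hr5 := Int.emod_lt_of_pos a hs
  constructor
  · nlinarith
  · nlinarith

theorem solve_eq_alt : ∀ (m x y : Int),
    Dom_solve m x y → Pre_solve m x y → solve m x y = solve_alt m x y := by
  intro m x y hdom hpre
  unfold Dom_solve pvDomInt at hdom
  simp only [Bool.and_eq_true, decide_eq_true_eq] at hdom
  obtain ⟨⟨⟨hmlo, hmhi⟩, hxlo, hxhi⟩, hylo, hyhi⟩ := hdom
  obtain ⟨hm1, hcov⟩ := hpre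
  by_cases hm14 : m ≤ 14
  · rw [if_pos hm14] at hcov
    obtain ⟨n, rfl⟩ : ∃ n : Nat, m = ((n+1 : Nat) : Int) := ⟨(m-1).toNat, by omega⟩
    have htn : ((((n+1:Nat)):Int) - 1).toNat = n := by omega
    have htN : ((((n+1:Nat)):Int)).toNat = n+1 := by omega
    rw [htn] at hcov
    have hs : (0:Int) < 5^n := by positivity
    have hps : (5:Int)^(n+1) = 5 * 5^n := by rw [pow_succ]; ring
    have hediv : ∀ a : Int, PySem.Int.floordiv a ((5:Int)^n) = a / 5^n :=
      fun a => PySem.Int.floordiv_eq_ediv_of_pos hs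
    rw [hediv, hediv] at hcov
    show solveA (((n+1:Nat):Int)).toNat _ x y = solveLoop (((n+1:Nat):Int)).toNat _ x y
    rw [htN, htn]
    rcases hcov with hcr | hemp | hunc
    · have hqx : 0 ≤ x / 5^n ∧ x / 5^n ≤ 4 := by
        rcases hcr with ⟨h1, h2|h2|h2⟩ | ⟨h2, h1⟩ <;> rw [h2] <;> norm_num
      have hqy : 0 ≤ y / 5^n ∧ y / 5^n ≤ 4 := by
        rcases hcr with ⟨h1, h2|h2|h2⟩ | ⟨h2, h1⟩ <;> rw [h1] <;> norm_num
      obtain ⟨hx0', hx5⟩ := quot_bounds _ x hs hqx.1 hqx.2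
      obtain ⟨hy0', hy5⟩ := quot_bounds _ y hs hqy.1 hqy.2
      exact solveA_eq_loop n x y hx0' (by rw [hps]; exact hx5) hy0' (by rw [hps]; exact hy5)
    · obtain ⟨hc, hu, he⟩ := conds_of_empty _ _ hemp
      rw [solveA_eq, solveLoop_eq, htn, hediv, hediv, hc, hu, he]
      rfl
    · have hqx : 0 ≤ x / 5^n ∧ x / 5^n ≤ 4 := by
        rcases hunc with ⟨h2|h2, h1⟩ | ⟨h2, h1⟩ <;> rw [h2] <;> norm_num
      have hqy : 0 ≤ y / 5^n ∧ y / 5^n ≤ 4 := by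
        rcases hunc with ⟨h2|h2, h1⟩ | ⟨h2, h1⟩ <;> rw [h1] <;> norm_num
      obtain ⟨hx0', hx5⟩ := quot_bounds _ x hs hqx.1 hqx.2
      obtain ⟨hy0', hy5⟩ := quot_bounds _ y hs hqy.1 hqy.2
      exact solveA_eq_loop n x y hx0' (by rw [hps]; exact hx5) hy0' (by rw [hps]; exact hy5)
  · rw [if_neg hm14] at hcov
    have ht14 : 14 ≤ (m-1).toNat := by omega
    have hs : (0:Int) < 5^(m-1).toNat := by positivity
    have hxlt : x < 5^(m-1).toNat := by
      have h14 : (6103515625:Int) ≤ 5^(m-1).toNat :=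
        le_of_eq_of_le (by norm_num) (pow_le_pow_right₀ (by norm_num) ht14)
      omega
    have hcx : PySem.Int.floordiv x ((5:Int)^(m-1).toNat) = 0 := by
      rw [PySem.Int.floordiv_eq_ediv_of_pos hs]
      exact Int.ediv_eq_zero_of_lt hcov hxlt
    obtain ⟨f, hf⟩ : ∃ f : Nat, m.toNat = f+1 := ⟨m.toNat - 1, by omega⟩
    show solveA m.toNat m x y = solveLoop m.toNat _ x y
    rw [hf, solveA_eq, solveLoop_eq, hcx]
    have h1 : condCrys 0 (PySem.Int.floordiv y ((5:Int)^(m-1).toNat)) = false := by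
      simp [condCrys]
    have h2 : condUnc 0 (PySem.Int.floordiv y ((5:Int)^(m-1).toNat)) = false := by
      simp [condUnc]
    have h3 : condEmp 0 (PySem.Int.floordiv y ((5:Int)^(m-1).toNat)) = true := by
      simp [condEmp]
    rw [h1, h2, h3]
    rfl

-- ===== VERDICT (by name: the statement is the Claim_ definition above) =====
theorem solve_spec : Claim_equal_solve := by
  intro m x y hdom hpre
  unfold Spec_solve
  exact solve_eq_alt m x y hdom hpre
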